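-- pv_equiv track=rewrite | github.com/Ocamp09/fairway-ink-api | backend/flask/app.py | calculate_order_amount
-- ===== SOURCE A (Python) =====
-- CUSTOM_PRICE = 799
--
-- SOLID_PRICE = 599
--
-- TEXT_PRICE = 599
--
-- def calculate_order_amount(items):
--     price = 0
--     for item in items:
--         match item['type']:
--             case "solid":
--                 price += SOLID_PRICE
--             case "text":
--                 price += TEXT_PRICE
--             case "custom":
--                 price += CUSTOM_PRICE
--             case _:
--                 return -1
--     return price
-- ===== SOURCE B (Python) =====
-- def calculate_order_amount(items):
--     PRICES = {"solid": 599, "text": 599, "custom": 799}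
--     counts = {}
--     for item in items:
--         t = item['type']
--         if t not in PRICES:
--             return -1
--         counts[t] = counts.get(t, 0) + 1
--     return sum(n * PRICES[t] for t, n in counts.items())
-- ===== Notes on version B (the rewrite author's own statement) =====
-- stated objective: alternative
-- what changed: B maintains a per-type frequency dict instead of a running price, and computes the total afterwards as the sum over distinct types of count*price (aggregate-then-compute), keeping the single lazy pass so -1 and KeyError happen at the same item as in A.
import Mathlib
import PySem

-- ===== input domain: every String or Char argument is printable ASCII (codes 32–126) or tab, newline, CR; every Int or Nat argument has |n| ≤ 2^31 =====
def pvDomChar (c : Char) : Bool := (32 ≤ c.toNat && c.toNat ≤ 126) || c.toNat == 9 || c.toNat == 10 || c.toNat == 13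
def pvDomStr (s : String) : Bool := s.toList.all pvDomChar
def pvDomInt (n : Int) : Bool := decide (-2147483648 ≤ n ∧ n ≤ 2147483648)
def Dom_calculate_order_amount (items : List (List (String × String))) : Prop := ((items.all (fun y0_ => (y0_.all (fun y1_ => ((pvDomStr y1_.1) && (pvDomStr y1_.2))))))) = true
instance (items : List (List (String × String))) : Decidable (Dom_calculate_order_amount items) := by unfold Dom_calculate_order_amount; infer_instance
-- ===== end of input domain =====

-- B aggregates a per-type frequency dict in one pass (early -1 on an unknown type, as A)
-- and then computes the total as the sum over distinct types of count*price
-- (objective: alternative decomposition, same cost).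

-- ===== PORT A =====
def pvSOLID_PRICE : Int := 599
def pvTEXT_PRICE : Int := 599
def pvCUSTOM_PRICE : Int := 799

def pvA_loop : List (List (String × String)) → Int → Int
  | [], price => price
  | item :: rest, price =>
    match (PySem.Dict.mk item).get? "type" with
    | none => 0  -- item['type'] raises KeyError here; excluded by Pre_
    | some t =>
      if t = "solid" then pvA_loop rest (price + pvSOLID_PRICE)
      else if t = "text" then pvA_loop rest (price + pvTEXT_PRICE)
      else if t = "custom" then pvA_loop rest (price + pvCUSTOM_PRICE)
      else -1

def calculate_order_amount (items : List (List (String × String))) : Int :=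
  pvA_loop items 0

-- ===== PORT B =====
def pvPRICES : PySem.Dict String Int :=
  PySem.Dict.ofList [("solid", 599), ("text", 599), ("custom", 799)]

-- the counting loop; `none` = the early `return -1`
def pvB_loop : List (List (String × String)) → PySem.Dict String Int → Option (PySem.Dict String Int)
  | [], counts => some counts
  | item :: rest, counts =>
    match (PySem.Dict.mk item).get? "type" with
    | none => some PySem.Dict.empty  -- item['type'] raises KeyError here; excluded by Pre_
    | some t =>
      if pvPRICES.contains t then
        pvB_loop rest (counts.insert t (counts.getD t 0 + 1))
      else none

def calculate_order_amount_alt (items : List (List (String × String))) : Int :=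
  match pvB_loop items PySem.Dict.empty with
  | none => -1
  | some counts => (counts.items.map (fun p => p.2 * pvPRICES.getD p.1 0)).sum

-- ===== PRECONDITION & SPEC =====
-- an item is consumed without raising/returning -1 iff it has a valid 'type'
def pvValidItem (item : List (String × String)) : Bool :=
  match (PySem.Dict.mk item).get? "type" with
  | none => false
  | some t => pvPRICES.contains t

-- Pre_ excludes exactly the inputs where A (and B alike) raises KeyError: those whose
-- first item without a valid type lacks the 'type' key altogether.
def Pre_calculate_order_amount (items : List (List (String × String))) : Prop :=
  ∀ item ∈ (items.dropWhile pvValidItem).take 1, "type" ∈ item.map Prod.fst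
instance (items : List (List (String × String))) : Decidable (Pre_calculate_order_amount items) := by unfold Pre_calculate_order_amount; infer_instance

def pvWitness_calculate_order_amount : (List (List (String × String))) :=
  [[("type", "solid")], [("type", "custom"), ("size", "large")]]

def Spec_calculate_order_amount (items : List (List (String × String))) (out : Int) : Prop := out = calculate_order_amount_alt items
instance (items : List (List (String × String))) (out : Int) : Decidable (Spec_calculate_order_amount items out) := by unfold Spec_calculate_order_amount; infer_instance

-- ===== CLAIM (what is proved, stated in full; the proofs are below) =====
def Claim_equal_calculate_order_amount : Prop := ∀ (items : List (List (String × String))), Dom_calculate_order_amount items → Pre_calculate_order_amount items → Spec_calculate_order_amount items (calculate_order_amount items)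

-- ===== LEMMAS AND PROOFS =====

def pvW (d : PySem.Dict String Int) : Int :=
  (d.items.map (fun p => p.2 * pvPRICES.getD p.1 0)).sum

lemma pvW_list_update (t : String) (w : Int) (l : List (String × Int))
    (hnd : (l.map Prod.fst).Nodup) (hm : (t, w) ∈ l) :
    ((l.map (fun p => if p.1 == t then (t, w + 1) else p)).map
        (fun p => p.2 * pvPRICES.getD p.1 0)).sum
      = (l.map (fun p => p.2 * pvPRICES.getD p.1 0)).sum + pvPRICES.getD t 0 := by
  induction l with
  | nil => cases hm
  | cons q l ih =>
    simp only [List.map_cons, List.nodup_cons] at hnd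
    rcases List.mem_cons.mp hm with h | h
    · have hq : q = (t, w) := h.symm
      subst hq
      have htail : ∀ p ∈ l, (if (p.1 == t) = true then (t, w + 1) else p) = p := by
        intro p hp
        refine if_neg (fun hb => hnd.1 ?_)
        have he : p.1 = t := by simpa using hb
        exact List.mem_map.mpr ⟨p, hp, he⟩
      simp only [List.map_cons, List.sum_cons, beq_self_eq_true, if_pos,
        List.map_congr_left htail]
      simp
      ring
    · have hq : (q.1 == t) = false := by
        refine beq_eq_false_iff_ne.mpr (fun e => hnd.1 ?_)
        rw [e]
        exact List.mem_map.mpr ⟨(t, w), h, rfl⟩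
      simp only [List.map_cons, List.sum_cons, hq, Bool.false_eq_true, if_false]
      rw [ih hnd.2 h]
      ring

lemma pvW_insert (d : PySem.Dict String Int) (t : String) (hnd : d.keys.Nodup) :
    pvW (d.insert t (d.getD t 0 + 1)) = pvW d + pvPRICES.getD t 0 := by
  by_cases hc : d.contains t = true
  · obtain ⟨w, hw⟩ : ∃ w, d.get? t = some w := by
      cases hg : d.get? t with
      | none => rw [PySem.Dict.contains_eq_isSome_get?, hg] at hc; simp at hc
      | some w => exact ⟨w, rfl⟩
    have hmem : (t, w) ∈ d.items := PySem.Dict.mem_items_of_get?_eq_some d hw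
    have hgd : d.getD t 0 = w := PySem.Dict.getD_of_get?_eq_some d 0 hw
    unfold pvW
    rw [PySem.Dict.items_insert_of_contains d _ hc, hgd]
    exact pvW_list_update t w d.items (by simpa [PySem.Dict.keys] using hnd) hmem
  · have hc' : d.contains t = false := by simpa using hc
    unfold pvW
    rw [PySem.Dict.items_insert_of_not_contains d _ hc',
        PySem.Dict.getD_of_not_contains d 0 hc']
    simp

lemma pvA_eq_B (items : List (List (String × String))) :
    ∀ (acc : Int) (counts : PySem.Dict String Int), counts.keys.Nodup →
    Pre_calculate_order_amount items →
    pvA_loop items acc =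
      (match pvB_loop items counts with
       | none => -1
       | some c => acc + pvW c - pvW counts) := by
  induction items with
  | nil => intro acc counts _ _; simp [pvA_loop, pvB_loop]
  | cons item rest ih =>
    intro acc counts hnd hpre
    cases hg : (PySem.Dict.mk item).get? "type" with
    | none =>
      exfalso
      have hv : pvValidItem item = false := by simp [pvValidItem, hg]
      unfold Pre_calculate_order_amount at hpre
      rw [List.dropWhile_cons, hv] at hpre
      simp only [Bool.false_eq_true, if_false, List.take_succ_cons, List.take_zero,
        List.mem_singleton, forall_eq] at hpre
      exact (PySem.Dict.get?_eq_none_iff_not_mem_keys _ _).mp hg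
        (by simpa [PySem.Dict.keys] using hpre)
    | some t =>
      by_cases hc : pvPRICES.contains t = true
      · have hv : pvValidItem item = true := by simp [pvValidItem, hg, hc]
        have hpre' : Pre_calculate_order_amount rest := by
          unfold Pre_calculate_order_amount at hpre ⊢
          rwa [List.dropWhile_cons, hv, if_pos rfl] at hpre
        have hnd' : (counts.insert t (counts.getD t 0 + 1)).keys.Nodup :=
          PySem.Dict.nodup_keys_insert _ _ _ hnd
        have hW := pvW_insert counts t hnd
        have hprice : (t = "solid" ∨ t = "text" ∨ t = "custom") := by
          have := (PySem.Dict.contains_iff_mem_keys pvPRICES t).mp hc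
          rw [show pvPRICES.keys = ["solid", "text", "custom"] from by decide] at this
          simpa using this
        rcases hprice with rfl | rfl | rfl
        · rw [show pvA_loop (item :: rest) acc = pvA_loop rest (acc + pvSOLID_PRICE) from by
                simp [pvA_loop, hg],
              show pvB_loop (item :: rest) counts
                  = pvB_loop rest (counts.insert "solid" (counts.getD "solid" 0 + 1)) from by
                simp [pvB_loop, hg, hc],
              ih (acc + pvSOLID_PRICE) _ hnd' hpre']
          cases pvB_loop rest (counts.insert "solid" (counts.getD "solid" 0 + 1)) with
          | none => rfl
          | some c =>
            simp only [hW, show pvPRICES.getD "solid" 0 = 599 from by decide, pvSOLID_PRICE]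
            ring
        · rw [show pvA_loop (item :: rest) acc = pvA_loop rest (acc + pvTEXT_PRICE) from by
                simp [pvA_loop, hg],
              show pvB_loop (item :: rest) counts
                  = pvB_loop rest (counts.insert "text" (counts.getD "text" 0 + 1)) from by
                simp [pvB_loop, hg, hc],
              ih (acc + pvTEXT_PRICE) _ hnd' hpre']
          cases pvB_loop rest (counts.insert "text" (counts.getD "text" 0 + 1)) with
          | none => rfl
          | some c =>
            simp only [hW, show pvPRICES.getD "text" 0 = 599 from by decide, pvTEXT_PRICE]
            ring
        · rw [show pvA_loop (item :: rest) acc = pvA_loop rest (acc + pvCUSTOM_PRICE) from by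
                simp [pvA_loop, hg],
              show pvB_loop (item :: rest) counts
                  = pvB_loop rest (counts.insert "custom" (counts.getD "custom" 0 + 1)) from by
                simp [pvB_loop, hg, hc],
              ih (acc + pvCUSTOM_PRICE) _ hnd' hpre']
          cases pvB_loop rest (counts.insert "custom" (counts.getD "custom" 0 + 1)) with
          | none => rfl
          | some c =>
            simp only [hW, show pvPRICES.getD "custom" 0 = 799 from by decide, pvCUSTOM_PRICE]
            ring
      · have hc' : pvPRICES.contains t = false := by simpa using hc
        have hts : t ≠ "solid" := by rintro rfl; revert hc'; decide
        have htt : t ≠ "text" := by rintro rfl; revert hc'; decide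
        have htc : t ≠ "custom" := by rintro rfl; revert hc'; decide
        simp [pvA_loop, pvB_loop, hg, hts, htt, htc, hc']

-- ===== VERDICT (by name: the statement is the Claim_ definition above) =====
theorem calculate_order_amount_spec : Claim_equal_calculate_order_amount := by
  intro items _ hpre
  unfold Spec_calculate_order_amount calculate_order_amount calculate_order_amount_alt
  rw [pvA_eq_B items 0 PySem.Dict.empty (by simp) hpre]
  cases h : pvB_loop items PySem.Dict.empty with
  | none => simp
  | some c =>
    show 0 + pvW c - pvW PySem.Dict.empty = _
    rw [show pvW PySem.Dict.empty = 0 from rfl]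
    simp [pvW]
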